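-- pv_equiv track=rewrite | github.com/mattfisc/python | HW8program6_inc_dec.py | increasing_decreasing
-- ===== SOURCE A (Python) =====
-- def increasing_decreasing(a):
--
--     countIncrease= 0
--     countDecrease = 0
--     increase = 0
--     decrease = 0
--
--     # end one early
--     for i in range(len(a)-1):
--
--         #increase count
--         if a[i]+1 == a[i+1]:
--             increase += 1
--         # end of increase
--         else:
--             if countIncrease < increase:
--                 increase+=1 #count last num
--                 countIncrease = increase
--             increase = 0
--
--         #decrease count
--         if a[i]-1 == a[i+1]:
--             decrease += 1
--         else:
--             if countDecrease < decrease: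
--                 decrease += 1 #count last num
--                 countDecrease = decrease
--             decrease = 0
--
--     return countIncrease, countDecrease
-- ===== SOURCE B (Python) =====
-- def increasing_decreasing(a):
--     # Pass 1: record the step-count of every COMPLETED run (the trailing
--     # active run is intentionally not flushed, matching the task's rule).
--     inc_runs = []
--     dec_runs = []
--     inc = 0
--     dec = 0
--     for x, y in zip(a, a[1:]):
--         if y == x + 1:
--             inc += 1
--         else:
--             inc_runs.append(inc)
--             inc = 0
--         if y == x - 1:
--             dec += 1
--         else:
--             dec_runs.append(dec)
--             dec = 0
--     # Pass 2: aggregate each run list with the order-dependent rule.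
--     ci = 0
--     for s in inc_runs:
--         if ci < s:
--             ci = s + 1
--     cd = 0
--     for s in dec_runs:
--         if cd < s:
--             cd = s + 1
--     return ci, cd
-- ===== Notes on version B (the rewrite author's own statement) =====
-- stated objective: alternative
-- what changed: A's single interleaved loop that updates both best-counters in place is replaced by a two-phase decomposition: one pass over adjacent pairs collecting the completed increasing-run and decreasing-run step counts into two lists (the trailing active run is not flushed, as the task specifies), then a separate fold of each list with the order-dependent best-so-far rule.
import Mathlib
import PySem

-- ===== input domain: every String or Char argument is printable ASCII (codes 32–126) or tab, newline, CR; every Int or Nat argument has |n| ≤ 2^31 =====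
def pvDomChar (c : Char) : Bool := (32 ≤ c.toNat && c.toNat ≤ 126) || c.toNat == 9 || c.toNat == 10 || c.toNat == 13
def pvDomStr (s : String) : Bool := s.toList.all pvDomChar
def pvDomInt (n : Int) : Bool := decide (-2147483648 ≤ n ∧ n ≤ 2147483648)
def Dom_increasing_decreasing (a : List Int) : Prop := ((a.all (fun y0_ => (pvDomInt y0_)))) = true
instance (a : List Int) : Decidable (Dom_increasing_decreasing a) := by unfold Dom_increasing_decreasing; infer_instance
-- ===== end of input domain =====

-- B replaces A's single interleaved index loop by a two-phase decomposition:
-- collect the completed-run step counts into two lists, then aggregate each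
-- list separately with the order-dependent rule (objective: alternative).

-- ===== PORT A =====
-- A's loop body over index i, state (countIncrease, countDecrease, increase, decrease)
def stepA (a : List Int) (s : Int × Int × Int × Int) (i : Int) : Int × Int × Int × Int :=
  match s with
  | (ci, cd, inc, dec) =>
    let p := if PySem.List.pyGetD a i 0 + 1 = PySem.List.pyGetD a (i + 1) 0 then
        (ci, inc + 1)
      else if ci < inc then (inc + 1, 0) else (ci, 0)
    let q := if PySem.List.pyGetD a i 0 - 1 = PySem.List.pyGetD a (i + 1) 0 then
        (cd, dec + 1)
      else if cd < dec then (dec + 1, 0) else (cd, 0)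
    (p.1, q.1, p.2, q.2)

-- indices stay in range throughout, so pyGetD (default 0) is exact for a[i]
def increasing_decreasing (a : List Int) : Int × Int :=
  let s := (PySem.List.pyRange 0 ((a.length : Int) - 1) 1).foldl (stepA a) (0, 0, 0, 0)
  (s.1, s.2.1)

-- ===== PORT B =====
-- pass 1 body: state (inc_runs, dec_runs, inc, dec), input a neighbouring pair
def stepB (s : List Int × List Int × Int × Int) (p : Int × Int) :
    List Int × List Int × Int × Int :=
  match s with
  | (ri, rd, inc, dec) =>
    let u := if p.2 = p.1 + 1 then (ri, inc + 1) else (ri ++ [inc], 0)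
    let v := if p.2 = p.1 - 1 then (rd, dec + 1) else (rd ++ [dec], 0)
    (u.1, v.1, u.2, v.2)

-- pass 2: the order-dependent aggregation rule
def ruleFold (l : List Int) : Int :=
  l.foldl (fun c s => if c < s then s + 1 else c) 0

-- zip(a, a[1:]) is a.zip (a.drop 1)
def increasing_decreasing_alt (a : List Int) : Int × Int :=
  let s := (a.zip (a.drop 1)).foldl stepB ([], [], 0, 0)
  (ruleFold s.1, ruleFold s.2.1)

-- ===== PRECONDITION & SPEC =====
def Spec_increasing_decreasing (a : List Int) (out : Int × Int) : Prop := out = increasing_decreasing_alt a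
instance (a : List Int) (out : Int × Int) : Decidable (Spec_increasing_decreasing a out) := by unfold Spec_increasing_decreasing; infer_instance

-- ===== CLAIM (what is proved, stated in full; the proofs are below) =====
def Claim_equal_increasing_decreasing : Prop := ∀ (a : List Int), Dom_increasing_decreasing a → Spec_increasing_decreasing a (increasing_decreasing a)

-- ===== LEMMAS AND PROOFS =====

-- A's loop body expressed on the pair (a[i], a[i+1]) directly (conditions
-- oriented like stepB's; the bridge to stepA flips them)
def stepP (s : Int × Int × Int × Int) (p : Int × Int) : Int × Int × Int × Int :=
  match s with
  | (ci, cd, inc, dec) =>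
    let u := if p.2 = p.1 + 1 then (ci, inc + 1)
      else if ci < inc then (inc + 1, 0) else (ci, 0)
    let v := if p.2 = p.1 - 1 then (cd, dec + 1)
      else if cd < dec then (dec + 1, 0) else (cd, 0)
    (u.1, v.1, u.2, v.2)

lemma foldl_range_pairs {S : Type} (f : S → Int → Int → S) :
    ∀ (a : List Int) (init : S),
    (List.range (a.length - 1)).foldl (fun s k => f s (a.getD k 0) (a.getD (k + 1) 0)) init
      = (a.zip (a.drop 1)).foldl (fun s p => f s p.1 p.2) init := by
  intro a
  induction a with
  | nil => intro init; simp
  | cons x t ih =>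
    intro init
    cases t with
    | nil => simp
    | cons y t' =>
      simp only [List.length_cons, Nat.add_sub_cancel, List.range_succ_eq_map,
        List.foldl_cons, List.foldl_map, List.drop_succ_cons, List.drop_zero,
        List.zip_cons_cons, List.getD_cons_zero, List.getD_cons_succ]
      exact ih (f init x y)

lemma foldl_pyRange_pairs {S : Type} (f : S → Int → Int → S) (a : List Int) (init : S) :
    (PySem.List.pyRange 0 ((a.length : Int) - 1) 1).foldl
        (fun s i => f s (PySem.List.pyGetD a i 0) (PySem.List.pyGetD a (i + 1) 0)) init
      = (a.zip (a.drop 1)).foldl (fun s p => f s p.1 p.2) init := by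
  have ht : (((a.length : Int) - 1) - 0).toNat = a.length - 1 := by omega
  rw [PySem.List.pyRange_one, ht, List.foldl_map, ← foldl_range_pairs f a init]
  congr 1
  funext s k
  simp only [zero_add]
  rw [show ((k : Int) + 1) = (((k + 1 : Nat)) : Int) by push_cast; ring,
    PySem.List.pyGetD_natCast, PySem.List.pyGetD_natCast]

-- prefix property of B's pass 1: the accumulated run lists just get appended to
lemma stepB_prefix : ∀ (l : List (Int × Int)) (ri rd : List Int) (inc dec : Int),
    l.foldl stepB (ri, rd, inc, dec)
      = (ri ++ (l.foldl stepB ([], [], inc, dec)).1,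
         rd ++ (l.foldl stepB ([], [], inc, dec)).2.1,
         (l.foldl stepB ([], [], inc, dec)).2.2) := by
  intro l
  induction l with
  | nil => intro ri rd inc dec; simp [List.foldl_nil]
  | cons p t ih =>
    intro ri rd inc dec
    simp only [List.foldl_cons, stepB]
    split_ifs
    · exact ih ri rd (inc + 1) (dec + 1)
    · rw [ih ri (rd ++ [dec]) (inc + 1) 0, ih ([] : List Int) ([] ++ [dec]) (inc + 1) 0]
      simp [List.append_assoc]
    · rw [ih (ri ++ [inc]) rd 0 (dec + 1), ih ([] ++ [inc]) ([] : List Int) 0 (dec + 1)]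
      simp [List.append_assoc]
    · rw [ih (ri ++ [inc]) (rd ++ [dec]) 0 0, ih ([] ++ [inc]) ([] ++ [dec]) 0 0]
      simp [List.append_assoc]

-- main invariant: A's interleaved fold equals rule-folding B's run lists
lemma main_inv : ∀ (l : List (Int × Int)) (ci cd inc dec : Int),
    (l.foldl stepP (ci, cd, inc, dec)).1
        = (l.foldl stepB ([], [], inc, dec)).1.foldl (fun c s => if c < s then s + 1 else c) ci
    ∧ (l.foldl stepP (ci, cd, inc, dec)).2.1
        = (l.foldl stepB ([], [], inc, dec)).2.1.foldl (fun c s => if c < s then s + 1 else c) cd := by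
  intro l
  induction l with
  | nil => intro ci cd inc dec; simp
  | cons p t ih =>
    intro ci cd inc dec
    simp only [List.foldl_cons, stepP, stepB]
    by_cases h1 : p.2 = p.1 + 1 <;> by_cases h2 : p.2 = p.1 - 1
    · simp only [if_pos h1, if_pos h2]
      exact ih ci cd (inc + 1) (dec + 1)
    · simp only [if_pos h1, if_neg h2, List.nil_append]
      rw [stepB_prefix t]
      simp only [List.nil_append, List.foldl_append, List.foldl_cons, List.foldl_nil]
      by_cases hc : cd < dec <;> simp only [hc, if_true, if_false]
      · exact ih ci (dec + 1) (inc + 1) 0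
      · exact ih ci cd (inc + 1) 0
    · simp only [if_neg h1, if_pos h2, List.nil_append]
      rw [stepB_prefix t]
      simp only [List.nil_append, List.foldl_append, List.foldl_cons, List.foldl_nil]
      by_cases hb : ci < inc <;> simp only [hb, if_true, if_false]
      · exact ih (inc + 1) cd 0 (dec + 1)
      · exact ih ci cd 0 (dec + 1)
    · simp only [if_neg h1, if_neg h2, List.nil_append]
      rw [stepB_prefix t]
      simp only [List.foldl_append, List.foldl_cons, List.foldl_nil]
      by_cases hb : ci < inc <;> by_cases hc : cd < dec <;>
        simp only [hb, hc, if_true, if_false]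
      · exact ih (inc + 1) (dec + 1) 0 0
      · exact ih (inc + 1) cd 0 0
      · exact ih ci (dec + 1) 0 0
      · exact ih ci cd 0 0

-- stepA on index i is stepP on the pair (a[i], a[i+1])
lemma stepA_eq_stepP (a : List Int) (s : Int × Int × Int × Int) (i : Int) :
    stepA a s i = stepP s (PySem.List.pyGetD a i 0, PySem.List.pyGetD a (i + 1) 0) := by
  rcases s with ⟨ci, cd, inc, dec⟩
  simp only [stepA, stepP]
  by_cases hx : PySem.List.pyGetD a i 0 + 1 = PySem.List.pyGetD a (i + 1) 0 <;>
    by_cases hy : PySem.List.pyGetD a i 0 - 1 = PySem.List.pyGetD a (i + 1) 0 <;>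
    simp [hx, hy, eq_comm]

-- ===== VERDICT (by name: the statement is the Claim_ definition above) =====
theorem increasing_decreasing_spec : Claim_equal_increasing_decreasing := by
  intro a _
  unfold Spec_increasing_decreasing increasing_decreasing increasing_decreasing_alt ruleFold
  have hA : (PySem.List.pyRange 0 ((a.length : Int) - 1) 1).foldl (stepA a) (0, 0, 0, 0)
      = (a.zip (a.drop 1)).foldl stepP (0, 0, 0, 0) := by
    have h := foldl_pyRange_pairs (fun s x y => stepP s (x, y)) a ((0 : Int), (0 : Int), (0 : Int), (0 : Int))
    simp only [← stepA_eq_stepP] at h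
    exact h
  obtain ⟨h1, h2⟩ := main_inv (a.zip (a.drop 1)) 0 0 0 0
  simp only [hA, h1, h2]
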